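-- pv_equiv track=rewrite | github.com/LEW21/pydbus | pydbus/translator.py | variant_guidance_possibilities
-- ===== SOURCE A (Python) =====
-- def variant_guidance_possibilities(modified_introspection_string):
--     # Because guidance for variants in python to dbus can have
--     # multiple paths bacuase of v:aa/bb: construct
--     # return a valid path for each call.
--     if not isinstance(modified_introspection_string, str):
--         yield ''
--         return
--     if 'v' not in modified_introspection_string:
--         yield modified_introspection_string
--         return
--     m_str = modified_introspection_string.split(':')  # xxxv:
--     if len(m_str) < 2: return modified_introspection_string
--     repeat_check = m_str[1].split('.')
--     if (len(repeat_check) < 2):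
--         variable_portion = repeat_check[0]
--         tail_portion = ''
--     else:
--         variable_portion = repeat_check[0]
--         tail_portion = repeat_check[1]
--
--     possibilities = variable_portion.split('/')
--     for p in possibilities:
--         for s in  variant_guidance_possibilities(':'.join(m_str[2:])) :
--             yield m_str[0] + ':' + p + tail_portion + ':' + s
-- ===== SOURCE B (Python) =====
-- from itertools import product
--
-- def variant_guidance_possibilities(modified_introspection_string):
--     # Iterative segment collection + itertools.product instead of recursion.
--     if not isinstance(modified_introspection_string, str):
--         yield ''
--         return
--     segments = []
--     cur = modified_introspection_string
--     while 'v' in cur: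
--         parts = cur.split(':')
--         if len(parts) < 2:
--             return
--         sub = parts[1].split('.')
--         tail = sub[1] if len(sub) >= 2 else ''
--         segments.append((parts[0], sub[0].split('/'), tail))
--         cur = ':'.join(parts[2:])
--     base = cur
--     for combo in product(*(branches for _, branches, _ in segments)):
--         pieces = [head + ':' + p + tail for (head, _, tail), p in zip(segments, combo)]
--         yield ':'.join(pieces + [base])
-- ===== Notes on version B (the rewrite author's own statement) =====
-- stated objective: alternative
-- what changed: Replaces A's recursive generator (one recursion level per variant segment) with an iterative loop that collects all (prefix, branches, tail) segments first and then enumerates the combinations with itertools.product.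
import Mathlib
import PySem

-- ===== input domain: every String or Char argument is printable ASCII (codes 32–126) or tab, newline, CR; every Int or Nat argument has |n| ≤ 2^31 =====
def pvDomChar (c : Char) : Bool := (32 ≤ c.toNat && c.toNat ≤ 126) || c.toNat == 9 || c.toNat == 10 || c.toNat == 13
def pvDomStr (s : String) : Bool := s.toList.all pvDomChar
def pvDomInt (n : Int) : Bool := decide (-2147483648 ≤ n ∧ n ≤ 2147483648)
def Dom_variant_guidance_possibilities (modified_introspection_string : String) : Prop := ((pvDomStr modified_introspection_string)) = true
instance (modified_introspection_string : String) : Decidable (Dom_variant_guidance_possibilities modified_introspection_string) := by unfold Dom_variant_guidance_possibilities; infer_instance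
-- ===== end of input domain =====

-- B replaces A's recursive generator by an iterative segment collection followed by a
-- cartesian-product enumeration of the branch choices (objective: alternative algorithm).


-- ===== PORT A =====
-- Recursive core of A, on code points; fuel only makes the recursion structural
-- (each recursive call is on ':'.join(m_str[2:]), strictly shorter than cur, so
-- fuel = length + 1 never runs out).  The isinstance branch of the Python cannot
-- fire for a String argument and is not ported.
def vgpACore : Nat → List Char → List (List Char)
  | 0, _ => []
  | fuel + 1, cur =>
    if ¬ (PySem.Chars.isIn ['v'] cur) then [cur]
    else
      let m_str := PySem.Chars.splitOn cur [':']
      if m_str.length < 2 then []   -- 'return <value>' in a generator: yields nothing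
      else
        let repeat_check := PySem.Chars.splitOn (m_str.getD 1 []) ['.']
        let vt : List Char × List Char :=
          if repeat_check.length < 2 then (repeat_check.getD 0 [], [])
          else (repeat_check.getD 0 [], repeat_check.getD 1 [])
        let possibilities := PySem.Chars.splitOn vt.1 ['/']
        possibilities.flatMap (fun p =>
          (vgpACore fuel (PySem.Chars.join [':'] (m_str.drop 2))).map
            (fun s => m_str.getD 0 [] ++ [':'] ++ p ++ vt.2 ++ [':'] ++ s))

def variant_guidance_possibilities (modified_introspection_string : String) : List String :=
  (vgpACore (modified_introspection_string.toList.length + 1)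
      modified_introspection_string.toList).map (fun cs => String.ofList cs)

-- ===== PORT B =====
-- B's while-loop: walk the remainder collecting (prefix, branches, tail) segments;
-- `none` = the loop hit a remainder containing 'v' with no ':' (yield nothing).
def vgpCollect : Nat → List Char → Option (List (List Char × List (List Char) × List Char) × List Char)
  | 0, _ => none
  | fuel + 1, cur =>
    if PySem.Chars.isIn ['v'] cur then
      let parts := PySem.Chars.splitOn cur [':']
      if parts.length < 2 then none
      else
        let sub := PySem.Chars.splitOn (parts.getD 1 []) ['.']
        let tail := if 2 ≤ sub.length then sub.getD 1 [] else []
        match vgpCollect fuel (PySem.Chars.join [':'] (parts.drop 2)) with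
        | none => none
        | some (segs, base) =>
          some ((parts.getD 0 [], PySem.Chars.splitOn (sub.getD 0 []) ['/'], tail) :: segs, base)
    else some ([], cur)

-- itertools.product over the branch lists, each choice already formatted as its piece
def vgpCombos : List (List Char × List (List Char) × List Char) → List (List (List Char))
  | [] => [[]]
  | (head, branches, tail) :: rest =>
    branches.flatMap (fun p =>
      (vgpCombos rest).map (fun ps => (head ++ [':'] ++ p ++ tail) :: ps))

def variant_guidance_possibilities_alt (modified_introspection_string : String) : List String :=
  match vgpCollect (modified_introspection_string.toList.length + 1)
      modified_introspection_string.toList with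
  | none => []
  | some (segs, base) =>
    (vgpCombos segs).map (fun ps => String.ofList (PySem.Chars.join [':'] (ps ++ [base])))

-- ===== PRECONDITION & SPEC =====
def Spec_variant_guidance_possibilities (modified_introspection_string : String) (out : List String) : Prop := out = variant_guidance_possibilities_alt modified_introspection_string
instance (modified_introspection_string : String) (out : List String) : Decidable (Spec_variant_guidance_possibilities modified_introspection_string out) := by unfold Spec_variant_guidance_possibilities; infer_instance

-- ===== CLAIM (what is proved, stated in full; the proofs are below) =====
def Claim_equal_variant_guidance_possibilities : Prop := ∀ (modified_introspection_string : String), Dom_variant_guidance_possibilities modified_introspection_string → Spec_variant_guidance_possibilities modified_introspection_string (variant_guidance_possibilities modified_introspection_string)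

-- ===== LEMMAS AND PROOFS =====

theorem vgp_join_cons_ne_nil (x : List Char) (l : List (List Char)) (h : l ≠ []) :
    PySem.Chars.join [':'] (x :: l) = x ++ [':'] ++ PySem.Chars.join [':'] l := by
  cases l with
  | nil => exact absurd rfl h
  | cons q r => exact PySem.Chars.join_cons_cons _ _ _ _

-- the invariant: A's recursion computes exactly B's product over B's collected segments
theorem vgpACore_eq (fuel : Nat) (cur : List Char) :
    vgpACore fuel cur =
      (match vgpCollect fuel cur with
        | none => []
        | some (segs, base) =>
          (vgpCombos segs).map (fun ps => PySem.Chars.join [':'] (ps ++ [base]))) := by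
  induction fuel generalizing cur with
  | zero => simp [vgpACore, vgpCollect]
  | succ n ih =>
    by_cases hv : PySem.Chars.isIn ['v'] cur = true
    · by_cases hl : (PySem.Chars.splitOn cur [':']).length < 2
      · simp [vgpACore, vgpCollect, hv, hl]
      · simp only [vgpACore, vgpCollect, hv, hl, if_true, if_false, ite_not]
        rw [ih]
        cases hc : vgpCollect n (PySem.Chars.join [':'] ((PySem.Chars.splitOn cur [':']).drop 2)) with
        | none => simp
        | some sb =>
          obtain ⟨segs, base⟩ := sb
          simp only [vgpCombos, List.map_flatMap, List.map_map]
          split_ifs with ht ht2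
          all_goals try omega
          all_goals
            apply List.flatMap_congr
            intro p _
            apply List.map_congr_left
            intro ps _
            simp only [Function.comp, List.cons_append]
            have hne : ps ++ [base] ≠ [] := by simp
            simp [vgp_join_cons_ne_nil _ _ hne, List.append_assoc]
    · simp [vgpACore, vgpCollect, hv, vgpCombos, PySem.Chars.join_singleton]

-- ===== VERDICT (by name: the statement is the Claim_ definition above) =====
theorem variant_guidance_possibilities_spec : Claim_equal_variant_guidance_possibilities := by
  intro s _
  unfold Spec_variant_guidance_possibilities variant_guidance_possibilities
    variant_guidance_possibilities_alt
  rw [vgpACore_eq]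
  cases h : vgpCollect (s.toList.length + 1) s.toList with
  | none => simp
  | some sb => obtain ⟨segs, base⟩ := sb; simp [List.map_map]
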